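-- pv_equiv track=rewrite | github.com/DrGoo1/Music-Source-Separation-Training | complete_drum_comparison.py | group_drum_notes_by_instrument
-- ===== SOURCE A (Python) =====
-- def group_drum_notes_by_instrument(notes):
--     groups = {"Kick": [], "Snare": [], "HiHat": [], "Cymbals": [], "Other": []}
--     for note in notes:
--         pitch = note["pitch"]
--         if pitch in [35, 36]:
--             groups["Kick"].append(note)
--         elif pitch in [37, 38, 39, 40]:
--             groups["Snare"].append(note)
--         elif pitch in [42, 44, 46]:
--             groups["HiHat"].append(note)
--         elif pitch in [49, 51, 53, 57, 59]:
--             groups["Cymbals"].append(note)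
--         else:
--             groups["Other"].append(note)
--     return groups
-- ===== SOURCE B (Python) =====
-- _PITCH_TO_CAT = {
--     35: "Kick", 36: "Kick",
--     37: "Snare", 38: "Snare", 39: "Snare", 40: "Snare",
--     42: "HiHat", 44: "HiHat", 46: "HiHat",
--     49: "Cymbals", 51: "Cymbals", 53: "Cymbals", 57: "Cymbals", 59: "Cymbals",
-- }
--
-- def group_drum_notes_by_instrument(notes):
--     return {
--         name: [note for note in notes
--                if _PITCH_TO_CAT.get(note["pitch"], "Other") == name]
--         for name in ["Kick", "Snare", "HiHat", "Cymbals", "Other"]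
--     }
-- ===== Notes on version B (the rewrite author's own statement) =====
-- stated objective: idiomatic
-- what changed: Replaces A's per-note if/elif branch ladder with mutable dict appends by a flat pitch-to-category lookup table and a dict comprehension that builds each category's list with its own filter pass.
-- outside the precondition, e.g. on group_drum_notes_by_instrument([{'velocity': 90}]): A raises KeyError, B raises KeyError
import Mathlib
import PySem

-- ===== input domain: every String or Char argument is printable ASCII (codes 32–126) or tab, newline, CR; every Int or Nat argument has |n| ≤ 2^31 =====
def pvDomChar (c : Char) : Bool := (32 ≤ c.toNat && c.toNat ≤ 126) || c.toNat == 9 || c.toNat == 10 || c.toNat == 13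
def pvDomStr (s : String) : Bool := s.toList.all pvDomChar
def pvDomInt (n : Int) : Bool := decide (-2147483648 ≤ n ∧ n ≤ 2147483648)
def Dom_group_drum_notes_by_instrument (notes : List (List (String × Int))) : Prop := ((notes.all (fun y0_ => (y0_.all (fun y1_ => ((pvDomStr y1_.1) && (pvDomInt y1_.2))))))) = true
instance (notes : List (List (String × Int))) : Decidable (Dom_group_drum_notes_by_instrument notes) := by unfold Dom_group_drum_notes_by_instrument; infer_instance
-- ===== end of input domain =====

-- B replaces A's per-note if/elif ladder with a flat pitch→category table and builds each
-- category's list by its own comprehension (objective: idiomatic/alternative, not faster).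
-- Pre_ excludes notes that lack a "pitch" key, on which the Python A raises KeyError.

-- ===== PORT A =====

-- note["pitch"]: first match in the association list (exact for a dict access under Pre_)
def pvPitchOf (note : List (String × Int)) : Int :=
  ((note.find? (fun kv => kv.1 == "pitch")).map (·.2)).getD 0

-- groups[name].append(note) on the fixed-key dict: extend the list stored under `name`
def pvAppendAt (groups : List (String × List (List (String × Int)))) (name : String)
    (note : List (String × Int)) : List (String × List (List (String × Int))) :=
  groups.map (fun p => if p.1 == name then (p.1, p.2 ++ [note]) else p)

def group_drum_notes_by_instrument (notes : List (List (String × Int))) :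
    List (String × List (List (String × Int))) :=
  notes.foldl
    (fun groups note =>
      let pitch := pvPitchOf note
      if pitch ∈ ([35, 36] : List Int) then pvAppendAt groups "Kick" note
      else if pitch ∈ ([37, 38, 39, 40] : List Int) then pvAppendAt groups "Snare" note
      else if pitch ∈ ([42, 44, 46] : List Int) then pvAppendAt groups "HiHat" note
      else if pitch ∈ ([49, 51, 53, 57, 59] : List Int) then pvAppendAt groups "Cymbals" note
      else pvAppendAt groups "Other" note)
    [("Kick", []), ("Snare", []), ("HiHat", []), ("Cymbals", []), ("Other", [])]

-- ===== PORT B =====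

def pvPitchTable : List (Int × String) :=
  [(35, "Kick"), (36, "Kick"),
   (37, "Snare"), (38, "Snare"), (39, "Snare"), (40, "Snare"),
   (42, "HiHat"), (44, "HiHat"), (46, "HiHat"),
   (49, "Cymbals"), (51, "Cymbals"), (53, "Cymbals"), (57, "Cymbals"), (59, "Cymbals")]

-- _PITCH_TO_CAT.get(p, "Other"): first-match lookup in the table (keys are distinct)
def pvCatOf (p : Int) : String :=
  ((pvPitchTable.find? (fun kv => kv.1 == p)).map (·.2)).getD "Other"

def group_drum_notes_by_instrument_alt (notes : List (List (String × Int))) :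
    List (String × List (List (String × Int))) :=
  ["Kick", "Snare", "HiHat", "Cymbals", "Other"].map
    (fun name => (name, notes.filter (fun note => pvCatOf (pvPitchOf note) == name)))

-- ===== PRECONDITION & SPEC =====
-- Pre_ excludes inputs where some note has no "pitch" key: the Python A (and B) raise KeyError there.
def Pre_group_drum_notes_by_instrument (notes : List (List (String × Int))) : Prop :=
  (notes.all (fun note => note.any (fun kv => kv.1 == "pitch"))) = true
instance (notes : List (List (String × Int))) : Decidable (Pre_group_drum_notes_by_instrument notes) := by
  unfold Pre_group_drum_notes_by_instrument; infer_instance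

def pvWitness_group_drum_notes_by_instrument : (List (List (String × Int))) :=
  [[("pitch", 36), ("velocity", 90)], [("pitch", 38)], [("pitch", 61)]]

def Spec_group_drum_notes_by_instrument (notes : List (List (String × Int))) (out : List (String × List (List (String × Int)))) : Prop := out = group_drum_notes_by_instrument_alt notes
instance (notes : List (List (String × Int))) (out : List (String × List (List (String × Int)))) : Decidable (Spec_group_drum_notes_by_instrument notes out) := by unfold Spec_group_drum_notes_by_instrument; infer_instance

-- ===== CLAIM (what is proved, stated in full; the proofs are below) =====
def Claim_equal_group_drum_notes_by_instrument : Prop := ∀ (notes : List (List (String × Int))), Dom_group_drum_notes_by_instrument notes → Pre_group_drum_notes_by_instrument notes → Spec_group_drum_notes_by_instrument notes (group_drum_notes_by_instrument notes)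

-- ===== LEMMAS AND PROOFS =====

theorem pvCatOf_kick {p : Int} (h : p = 35 ∨ p = 36) : pvCatOf p = "Kick" := by
  rcases h with h | h <;> subst h <;> decide

theorem pvCatOf_snare {p : Int} (h : p = 37 ∨ p = 38 ∨ p = 39 ∨ p = 40) : pvCatOf p = "Snare" := by
  rcases h with h | h | h | h <;> subst h <;> decide

theorem pvCatOf_hihat {p : Int} (h : p = 42 ∨ p = 44 ∨ p = 46) : pvCatOf p = "HiHat" := by
  rcases h with h | h | h <;> subst h <;> decide

theorem pvCatOf_cymbals {p : Int} (h : p = 49 ∨ p = 51 ∨ p = 53 ∨ p = 57 ∨ p = 59) :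
    pvCatOf p = "Cymbals" := by
  rcases h with h | h | h | h | h <;> subst h <;> decide

theorem pvCatOf_other {p : Int}
    (h1 : ¬(p = 35 ∨ p = 36)) (h2 : ¬(p = 37 ∨ p = 38 ∨ p = 39 ∨ p = 40))
    (h3 : ¬(p = 42 ∨ p = 44 ∨ p = 46)) (h4 : ¬(p = 49 ∨ p = 51 ∨ p = 53 ∨ p = 57 ∨ p = 59)) :
    pvCatOf p = "Other" := by
  have hf : pvPitchTable.find? (fun kv => kv.1 == p) = none := by
    rw [List.find?_eq_none]
    intro x hx
    fin_cases hx <;> simp <;> omega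
  simp [pvCatOf, hf]

theorem pvLoopA (notes : List (List (String × Int))) (k s h c o : List (List (String × Int))) :
    notes.foldl
      (fun groups note =>
        let pitch := pvPitchOf note
        if pitch ∈ ([35, 36] : List Int) then pvAppendAt groups "Kick" note
        else if pitch ∈ ([37, 38, 39, 40] : List Int) then pvAppendAt groups "Snare" note
        else if pitch ∈ ([42, 44, 46] : List Int) then pvAppendAt groups "HiHat" note
        else if pitch ∈ ([49, 51, 53, 57, 59] : List Int) then pvAppendAt groups "Cymbals" note
        else pvAppendAt groups "Other" note)
      [("Kick", k), ("Snare", s), ("HiHat", h), ("Cymbals", c), ("Other", o)]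
    = [("Kick", k ++ notes.filter (fun n => pvCatOf (pvPitchOf n) == "Kick")),
       ("Snare", s ++ notes.filter (fun n => pvCatOf (pvPitchOf n) == "Snare")),
       ("HiHat", h ++ notes.filter (fun n => pvCatOf (pvPitchOf n) == "HiHat")),
       ("Cymbals", c ++ notes.filter (fun n => pvCatOf (pvPitchOf n) == "Cymbals")),
       ("Other", o ++ notes.filter (fun n => pvCatOf (pvPitchOf n) == "Other"))] := by
  induction notes generalizing k s h c o with
  | nil => simp
  | cons n rest ih =>
    simp only [List.foldl_cons]
    by_cases h1 : pvPitchOf n ∈ ([35, 36] : List Int)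
    · rw [if_pos h1]
      have hstep : pvAppendAt [("Kick", k), ("Snare", s), ("HiHat", h), ("Cymbals", c), ("Other", o)] "Kick" n
          = [("Kick", k ++ [n]), ("Snare", s), ("HiHat", h), ("Cymbals", c), ("Other", o)] := by
        simp [pvAppendAt]
      rw [hstep, ih]
      have hc := pvCatOf_kick (by simpa using h1)
      simp [hc]
    · rw [if_neg h1]
      by_cases h2 : pvPitchOf n ∈ ([37, 38, 39, 40] : List Int)
      · rw [if_pos h2]
        have hstep : pvAppendAt [("Kick", k), ("Snare", s), ("HiHat", h), ("Cymbals", c), ("Other", o)] "Snare" n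
            = [("Kick", k), ("Snare", s ++ [n]), ("HiHat", h), ("Cymbals", c), ("Other", o)] := by
          simp [pvAppendAt]
        rw [hstep, ih]
        have hc := pvCatOf_snare (by simpa using h2)
        simp [hc]
      · rw [if_neg h2]
        by_cases h3 : pvPitchOf n ∈ ([42, 44, 46] : List Int)
        · rw [if_pos h3]
          have hstep : pvAppendAt [("Kick", k), ("Snare", s), ("HiHat", h), ("Cymbals", c), ("Other", o)] "HiHat" n
              = [("Kick", k), ("Snare", s), ("HiHat", h ++ [n]), ("Cymbals", c), ("Other", o)] := by
            simp [pvAppendAt]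
          rw [hstep, ih]
          have hc := pvCatOf_hihat (by simpa using h3)
          simp [hc]
        · rw [if_neg h3]
          by_cases h4 : pvPitchOf n ∈ ([49, 51, 53, 57, 59] : List Int)
          · rw [if_pos h4]
            have hstep : pvAppendAt [("Kick", k), ("Snare", s), ("HiHat", h), ("Cymbals", c), ("Other", o)] "Cymbals" n
                = [("Kick", k), ("Snare", s), ("HiHat", h), ("Cymbals", c ++ [n]), ("Other", o)] := by
              simp [pvAppendAt]
            rw [hstep, ih]
            have hc := pvCatOf_cymbals (by simpa using h4)
            simp [hc]
          · rw [if_neg h4]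
            have hstep : pvAppendAt [("Kick", k), ("Snare", s), ("HiHat", h), ("Cymbals", c), ("Other", o)] "Other" n
                = [("Kick", k), ("Snare", s), ("HiHat", h), ("Cymbals", c), ("Other", o ++ [n])] := by
              simp [pvAppendAt]
            rw [hstep, ih]
            have hc := pvCatOf_other (by simpa using h1) (by simpa using h2)
              (by simpa using h3) (by simpa using h4)
            simp [hc]

-- ===== VERDICT (by name: the statement is the Claim_ definition above) =====
theorem group_drum_notes_by_instrument_spec : Claim_equal_group_drum_notes_by_instrument := by
  intro notes _ _
  unfold Spec_group_drum_notes_by_instrument group_drum_notes_by_instrument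
    group_drum_notes_by_instrument_alt
  rw [pvLoopA]
  simp
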